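-- pv_equiv track=rewrite | github.com/ALTA-DE1-Huda-Azi-Agista-12081998/Algo-DS-Part2 | problem2/main.py | maximum_buy_product
-- ===== SOURCE A (Python) =====
-- def maximum_buy_product(money, product_price):
--     if money <= 0 or not product_price:
--         return 0
--
--     unique_products = set(product_price)
--     unique_products_sorted = sorted(unique_products)
--
--     total_price = 0
--     count = 0
--
--     for price in unique_products_sorted:
--         if total_price + price <= money:
--             total_price += price
--             count += 1
--         else:
--             break
--
--     return count
-- ===== SOURCE B (Python) =====
-- def maximum_buy_product(money, product_price):
--     if money <= 0 or not product_price: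
--         return 0
--     cums = []
--     total = 0
--     for price in sorted(set(product_price)):
--         total += price
--         cums.append(total)
--     lo, hi = 0, len(cums)
--     while lo < hi:
--         mid = (lo + hi) // 2
--         if cums[mid] <= money:
--             lo = mid + 1
--         else:
--             hi = mid
--     return lo
-- ===== Notes on version B (the rewrite author's own statement) =====
-- stated objective: alternative
-- what changed: B builds the prefix-sum table of the sorted distinct prices once and then binary-searches it (a hand-written bisect_right) for the number of affordable prefix sums, instead of A's accumulate-with-early-break linear scan; correct because with money > 0 the predicate 'prefix sum <= money' is downward closed over the sorted distinct prices.
import Mathlib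
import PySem

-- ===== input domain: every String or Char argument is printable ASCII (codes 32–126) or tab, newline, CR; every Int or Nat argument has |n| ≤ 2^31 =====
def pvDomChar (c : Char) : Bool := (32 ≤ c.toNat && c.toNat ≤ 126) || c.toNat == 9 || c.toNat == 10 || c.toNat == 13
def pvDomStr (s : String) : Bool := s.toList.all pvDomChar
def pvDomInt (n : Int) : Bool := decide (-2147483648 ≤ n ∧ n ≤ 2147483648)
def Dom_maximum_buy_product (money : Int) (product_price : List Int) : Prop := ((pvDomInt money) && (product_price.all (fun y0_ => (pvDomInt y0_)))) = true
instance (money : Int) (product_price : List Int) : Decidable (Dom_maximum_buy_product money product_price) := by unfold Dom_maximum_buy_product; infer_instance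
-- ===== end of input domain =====

-- B builds the prefix-sum table of the sorted distinct prices and binary-searches it
-- (hand-written bisect_right) instead of A's accumulate-with-early-break linear scan
-- (alternative decomposition; same asymptotic cost).


-- ===== PORT A =====
-- the for-loop with break: state (total_price, count), break returns count
def pvLoopA (money : Int) : List Int → Int → Int → Int
  | [], _, count => count
  | price :: rest, total, count =>
    if total + price ≤ money then pvLoopA money rest (total + price) (count + 1)
    else count

def maximum_buy_product (money : Int) (product_price : List Int) : Int :=
  if money ≤ 0 ∨ product_price = [] then 0
  else
    pvLoopA money (PySem.List.sorted (PySem.Set.ofList product_price) (fun x => x) false) 0 0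

-- ===== PORT B =====
-- the loop building the cumulative-sum list cums
def pvCums (total : Int) : List Int → List Int
  | [] => []
  | price :: rest => (total + price) :: pvCums (total + price) rest

-- the while-loop of the hand-written bisect; cums[mid] is always in range
-- (0 ≤ lo ≤ mid < hi ≤ len cums), so getD is exact for Python's cums[mid]
def pvBisect (cums : List Int) (money : Int) (lo hi : Nat) : Nat :=
  if _h : lo < hi then
    let mid := (lo + hi) / 2
    if cums.getD mid 0 ≤ money then pvBisect cums money (mid + 1) hi
    else pvBisect cums money lo mid
  else lo
termination_by hi - lo
decreasing_by all_goals omega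

def maximum_buy_product_alt (money : Int) (product_price : List Int) : Int :=
  if money ≤ 0 ∨ product_price = [] then 0
  else
    let cums := pvCums 0 (PySem.List.sorted (PySem.Set.ofList product_price) (fun x => x) false)
    (pvBisect cums money 0 cums.length : Int)

-- ===== PRECONDITION & SPEC =====
def Spec_maximum_buy_product (money : Int) (product_price : List Int) (out : Int) : Prop := out = maximum_buy_product_alt money product_price
instance (money : Int) (product_price : List Int) (out : Int) : Decidable (Spec_maximum_buy_product money product_price out) := by unfold Spec_maximum_buy_product; infer_instance

-- ===== CLAIM (what is proved, stated in full; the proofs are below) =====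
def Claim_equal_maximum_buy_product : Prop := ∀ (money : Int) (product_price : List Int), Dom_maximum_buy_product money product_price → Spec_maximum_buy_product money product_price (maximum_buy_product money product_price)

-- ===== LEMMAS AND PROOFS =====

-- once a prefix sum exceeds money and all remaining prices are nonnegative, every later
-- prefix sum exceeds money too
theorem pvCums_filter_nil (money : Int) :
    ∀ (l : List Int) (s : Int), (∀ x ∈ l, 0 ≤ x) → money < s →
      (pvCums s l).filter (fun c => c ≤ money) = [] := by
  intro l
  induction l with
  | nil => intro s _ _; simp [pvCums]
  | cons p rest ih =>
    intro s hpos hs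
    have hp : 0 ≤ p := hpos p (by simp)
    have h1 : money < s + p := by omega
    simp only [pvCums, List.filter_cons]
    rw [if_neg (by simp; omega)]
    exact ih (s + p) (fun x hx => hpos x (by simp [hx])) h1

-- A's loop counts exactly the prefix sums that fit in the budget
theorem pvLoopA_eq (money : Int) :
    ∀ (l : List Int) (total count : Int), l.Pairwise (· ≤ ·) → total ≤ money →
      pvLoopA money l total count =
        count + (((pvCums total l).filter (fun c => c ≤ money)).length : Int) := by
  intro l
  induction l with
  | nil => intro total count _ _; simp [pvLoopA, pvCums]
  | cons p rest ih =>
    intro total count hpw htot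
    rcases List.pairwise_cons.mp hpw with ⟨hhead, hrest⟩
    simp only [pvLoopA, pvCums, List.filter_cons]
    by_cases h : total + p ≤ money
    · rw [if_pos h, if_pos (by simpa using h)]
      rw [ih (total + p) (count + 1) hrest h]
      simp; omega
    · rw [if_neg h, if_neg (by simpa using h)]
      have hp : 0 < p := by omega
      have hnil : (pvCums (total + p) rest).filter (fun c => c ≤ money) = [] :=
        pvCums_filter_nil money rest (total + p)
          (fun x hx => le_of_lt (lt_of_lt_of_le hp (hhead x hx)))
          (by omega)
      rw [hnil]; simp

-- for a sorted price list and a budget not yet exceeded, the affordable prefix sums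
-- form a prefix of the table: filter = takeWhile
theorem pvCums_filter_eq_takeWhile (money : Int) :
    ∀ (l : List Int) (s : Int), l.Pairwise (· ≤ ·) → s ≤ money →
      (pvCums s l).filter (fun c => c ≤ money) =
        (pvCums s l).takeWhile (fun c => c ≤ money) := by
  intro l
  induction l with
  | nil => intro s _ _; simp [pvCums]
  | cons p rest ih =>
    intro s hpw hs
    rcases List.pairwise_cons.mp hpw with ⟨hhead, hrest⟩
    simp only [pvCums, List.filter_cons, List.takeWhile_cons]
    by_cases h : s + p ≤ money
    · rw [if_pos (by simpa using h), if_pos (by simpa using h)]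
      rw [ih (s + p) hrest h]
    · rw [if_neg (by simpa using h), if_neg (by simpa using h)]
      have hp : 0 < p := by omega
      exact pvCums_filter_nil money rest (s + p)
        (fun x hx => le_of_lt (lt_of_lt_of_le hp (hhead x hx))) (by omega)

-- the binary search returns r, provided all indices below r satisfy the predicate and
-- all indices in [r, len) fail it
theorem pvBisect_eq (cums : List Int) (money : Int) (r : Nat)
    (hT : ∀ k, k < r → cums.getD k 0 ≤ money)
    (hF : ∀ k, r ≤ k → k < cums.length → ¬ cums.getD k 0 ≤ money) :
    ∀ (n lo hi : Nat), hi - lo ≤ n → lo ≤ r → r ≤ hi → hi ≤ cums.length →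
      pvBisect cums money lo hi = r := by
  intro n
  induction n with
  | zero =>
    intro lo hi hn hlo hhi hlen
    have : ¬ lo < hi := by omega
    rw [pvBisect, dif_neg this]; omega
  | succ m ih =>
    intro lo hi hn hlo hhi hlen
    by_cases hlt : lo < hi
    · rw [pvBisect, dif_pos hlt]
      simp only
      by_cases hc : cums.getD ((lo + hi) / 2) 0 ≤ money
      · rw [if_pos hc]
        have hmidr : (lo + hi) / 2 < r := by
          by_contra hge
          exact hF ((lo + hi) / 2) (by omega) (by omega) hc
        exact ih ((lo + hi) / 2 + 1) hi (by omega) (by omega) hhi hlen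
      · rw [if_neg hc]
        have hmidr : r ≤ (lo + hi) / 2 := by
          by_contra hge
          exact hc (hT ((lo + hi) / 2) (by omega))
        exact ih lo ((lo + hi) / 2) (by omega) hlo hmidr (by omega)
    · rw [pvBisect, dif_neg hlt]; omega

-- indices below the takeWhile length satisfy the predicate
theorem takeWhile_getD_le (money : Int) (cums : List Int)
    (k : Nat) (hk : k < (cums.takeWhile (fun c => decide (c ≤ money))).length) :
    cums.getD k 0 ≤ money := by
  have hpre : cums.takeWhile (fun c => decide (c ≤ money)) <+: cums :=
    List.takeWhile_prefix _
  have hklen : k < cums.length := lt_of_lt_of_le hk hpre.length_le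
  have hget : cums[k] = (cums.takeWhile (fun c => decide (c ≤ money)))[k] :=
    (List.IsPrefix.getElem hpre hk).symm
  have hmem : (cums.takeWhile (fun c => decide (c ≤ money)))[k] ∈
      cums.takeWhile (fun c => decide (c ≤ money)) := List.getElem_mem _
  have := List.mem_takeWhile_imp hmem
  rw [List.getD_eq_getElem cums 0 hklen, hget]
  simpa using this

-- when filter = takeWhile, indices at or beyond the takeWhile length fail the predicate
theorem takeWhile_getD_gt (money : Int) (cums : List Int)
    (heq : cums.filter (fun c => decide (c ≤ money)) =
           cums.takeWhile (fun c => decide (c ≤ money)))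
    (k : Nat) (hk : (cums.takeWhile (fun c => decide (c ≤ money))).length ≤ k)
    (hklen : k < cums.length) :
    ¬ cums.getD k 0 ≤ money := by
  set p : Int → Bool := fun c => decide (c ≤ money) with hp
  have hsplit : cums.takeWhile p ++ cums.dropWhile p = cums :=
    List.takeWhile_append_dropWhile
  have hfilter_take : (cums.takeWhile p).filter p = cums.takeWhile p :=
    List.filter_eq_self.mpr (fun a ha => List.mem_takeWhile_imp ha)
  have hfail : ∀ x ∈ cums.dropWhile p, p x = false := by
    have hcat : (cums.takeWhile p).filter p ++ (cums.dropWhile p).filter p =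
        cums.takeWhile p := by
      rw [← List.filter_append, hsplit, heq]
    rw [hfilter_take] at hcat
    have hlen := congrArg List.length hcat
    simp at hlen
    exact hlen
  have hlens : (cums.takeWhile p).length + (cums.dropWhile p).length = cums.length := by
    rw [← List.length_append, hsplit]
  -- cums[k] is an element of the dropWhile part
  have hk' : k - (cums.takeWhile p).length < (cums.dropWhile p).length := by omega
  have hgetr : cums[k]'hklen = (cums.dropWhile p)[k - (cums.takeWhile p).length]'hk' := by
    have e1 : cums[k]'hklen =
        (cums.takeWhile p ++ cums.dropWhile p)[k]'(by rw [hsplit]; exact hklen) :=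
      List.getElem_of_eq hsplit.symm hklen
    rw [e1, List.getElem_append_right (by omega)]
  have hmem : (cums.dropWhile p)[k - (cums.takeWhile p).length]'hk' ∈ cums.dropWhile p :=
    List.getElem_mem _
  have hfx := hfail _ hmem
  rw [List.getD_eq_getElem cums 0 hklen, hgetr]
  simpa [hp] using hfx

-- ===== VERDICT (by name: the statement is the Claim_ definition above) =====
theorem maximum_buy_product_spec : Claim_equal_maximum_buy_product := by
  unfold Claim_equal_maximum_buy_product
  intro money product_price _
  unfold Spec_maximum_buy_product maximum_buy_product maximum_buy_product_alt
  by_cases h : money ≤ 0 ∨ product_price = []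
  · rw [if_pos h, if_pos h]
  · rw [if_neg h, if_neg h]
    have hmoney : 0 ≤ money := by
      rcases not_or.mp h with ⟨h1, _⟩; omega
    set l := PySem.List.sorted (PySem.Set.ofList product_price) (fun x => x) false with hl
    have hpw : l.Pairwise (· ≤ ·) := by
      have := PySem.List.sorted_ofList_pairwise_lt (xs := product_price)
      exact this.imp (fun h => le_of_lt h)
    set cums := pvCums 0 l with hc
    have hfe : cums.filter (fun c => decide (c ≤ money)) =
        cums.takeWhile (fun c => decide (c ≤ money)) := by
      simpa using pvCums_filter_eq_takeWhile money l 0 hpw hmoney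
    set r := (cums.takeWhile (fun c => decide (c ≤ money))).length with hr
    have hrlen : r ≤ cums.length := (List.takeWhile_prefix _).length_le
    have hbis : pvBisect cums money 0 cums.length = r :=
      pvBisect_eq cums money r
        (fun k hk => takeWhile_getD_le money cums k hk)
        (fun k hk hklen => takeWhile_getD_gt money cums hfe k hk hklen)
        cums.length 0 cums.length (by omega) (by omega) hrlen (le_refl _)
    rw [pvLoopA_eq money l 0 0 hpw hmoney]
    show 0 + (((cums.filter (fun c => decide (c ≤ money))).length : Nat) : Int) =
      ((pvBisect cums money 0 cums.length : Nat) : Int)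
    rw [hbis, hr, hfe]
    omega
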